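-- pv_equiv track=rewrite | github.com/kotama7/AI-Scientist-v2-HPC | ai_scientist/treesearch/utils/memory_viz.py | get_phases_for_branch
-- ===== SOURCE A (Python) =====
-- def get_phases_for_branch(branch_id: str, events: dict, archival: dict) -> list[str]:
--     """Get all phases associated with a branch."""
--     phases = set()
--
--     for event in events.get(branch_id, []):
--         if event.get("phase"):
--             phases.add(event["phase"])
--
--     for record in archival.get(branch_id, []):
--         if record.get("phase"):
--             phases.add(record["phase"])
--
--     if events.get(branch_id) or archival.get(branch_id):
--         phases.add("summary")
--
--     return _sort_phases(phases)
--
-- def _sort_phases(phases: set[str]) -> list[str]: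
--     """Sort phases in canonical order."""
--     phase_order = ["phase0", "phase1", "phase2", "phase3", "phase4", "summary"]
--     sorted_phases = []
--     for p in phase_order:
--         if p in phases:
--             sorted_phases.append(p)
--     for p in sorted(phases):
--         if p not in sorted_phases:
--             sorted_phases.append(p)
--     return sorted_phases
-- ===== SOURCE B (Python) =====
-- _ORDER = ["phase0", "phase1", "phase2", "phase3", "phase4", "summary"]
--
-- def get_phases_for_branch(branch_id: str, events: dict, archival: dict) -> list[str]:
--     """Get all phases associated with a branch (single keyed sort instead of two-pass ordering)."""
--     ev = events.get(branch_id, [])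
--     ar = archival.get(branch_id, [])
--     phases = {r["phase"] for r in ev + ar if r.get("phase")}
--     if ev or ar:
--         phases.add("summary")
--     return sorted(phases, key=lambda p: (_ORDER.index(p) if p in _ORDER else len(_ORDER), p))
-- ===== Notes on version B (the rewrite author's own statement) =====
-- stated objective: simpler
-- what changed: Replaces the two-pass _sort_phases helper (canonical scan with membership tests, then sorted() plus a dedup filter against the growing output) by a single sorted() call with a composite key (canonical index or len(_ORDER), then the phase string), and builds the phase set with one comprehension over both record lists.
import Mathlib
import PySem

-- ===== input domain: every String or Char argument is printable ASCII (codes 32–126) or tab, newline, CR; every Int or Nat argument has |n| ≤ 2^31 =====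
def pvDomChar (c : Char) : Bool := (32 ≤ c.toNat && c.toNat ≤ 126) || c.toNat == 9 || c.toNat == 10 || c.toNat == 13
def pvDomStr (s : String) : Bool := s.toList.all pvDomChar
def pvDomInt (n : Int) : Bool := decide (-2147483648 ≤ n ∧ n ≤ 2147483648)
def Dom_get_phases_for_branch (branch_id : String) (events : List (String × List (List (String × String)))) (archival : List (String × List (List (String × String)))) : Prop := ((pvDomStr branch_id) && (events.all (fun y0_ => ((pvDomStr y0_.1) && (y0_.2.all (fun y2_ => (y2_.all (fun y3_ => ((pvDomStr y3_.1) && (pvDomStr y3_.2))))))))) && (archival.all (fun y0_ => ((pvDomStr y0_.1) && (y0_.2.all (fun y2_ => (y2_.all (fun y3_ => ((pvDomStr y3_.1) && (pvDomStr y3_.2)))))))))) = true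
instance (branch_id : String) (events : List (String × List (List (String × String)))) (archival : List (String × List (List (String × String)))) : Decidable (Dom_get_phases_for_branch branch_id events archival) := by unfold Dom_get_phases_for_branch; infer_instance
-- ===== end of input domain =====

-- B replaces A's two-pass canonical-then-alphabetical ordering by ONE keyed sort
-- (key = (position in the canonical list, or its length if absent; then the phase string)); objective: simpler.

-- ===== PORT A =====
-- `d.get(k, dflt)` on a plain assoc list (first match), via PySem.Dict
def pvGetD {α : Type} (d : List (String × α)) (k : String) (dflt : α) : α :=
  (PySem.Dict.mk d).getD k dflt

-- _sort_phases: canonical phases first (in canonical order), then the remaining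
-- phases alphabetically, skipping ones already placed.
def pvSortPhases (phases : PySem.Set String) : List String :=
  let phase_order := ["phase0", "phase1", "phase2", "phase3", "phase4", "summary"]
  let sorted_phases :=
    phase_order.foldl (fun acc p => if PySem.Set.contains phases p then acc ++ [p] else acc) []
  -- `sorted(phases)` on a set: the key is the identity, injective, so set-order-safe
  (PySem.List.sorted phases (fun x => x)).foldl
    (fun acc p => if acc.contains p then acc else acc ++ [p]) sorted_phases

-- `event.get("phase")` is truthy iff the value is present and non-empty; `event["phase"]`
-- equals `pvGetD event "phase" ""` under that guard, so getD "" is exact here.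
def get_phases_for_branch (branch_id : String) (events : List (String × List (List (String × String)))) (archival : List (String × List (List (String × String)))) : List String :=
  let phases : PySem.Set String := PySem.Set.empty
  let phases := (pvGetD events branch_id []).foldl
    (fun s event => if pvGetD event "phase" "" ≠ "" then PySem.Set.add s (pvGetD event "phase" "") else s) phases
  let phases := (pvGetD archival branch_id []).foldl
    (fun s record => if pvGetD record "phase" "" ≠ "" then PySem.Set.add s (pvGetD record "phase" "") else s) phases
  let phases := if pvGetD events branch_id [] ≠ [] ∨ pvGetD archival branch_id [] ≠ [] then PySem.Set.add phases "summary" else phases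
  pvSortPhases phases

-- ===== PORT B =====
def pvOrder : List String := ["phase0", "phase1", "phase2", "phase3", "phase4", "summary"]

-- `_ORDER.index(p) if p in _ORDER else len(_ORDER)`
def pvKey1 (p : String) : Int :=
  match PySem.List.index? pvOrder p with
  | some i => (i : Int)
  | none => (pvOrder.length : Int)

def get_phases_for_branch_alt (branch_id : String) (events : List (String × List (List (String × String)))) (archival : List (String × List (List (String × String)))) : List String :=
  let ev := pvGetD events branch_id []
  let ar := pvGetD archival branch_id []
  let phases : PySem.Set String :=
    PySem.Set.ofList (((ev ++ ar).filter (fun r => pvGetD r "phase" "" ≠ "")).map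
      (fun r => pvGetD r "phase" ""))
  let phases := if ev ≠ [] ∨ ar ≠ [] then PySem.Set.add phases "summary" else phases
  PySem.List.sorted2 phases pvKey1 (fun p => p)

-- ===== PRECONDITION & SPEC =====
def Spec_get_phases_for_branch (branch_id : String) (events : List (String × List (List (String × String)))) (archival : List (String × List (List (String × String)))) (out : List String) : Prop := out = get_phases_for_branch_alt branch_id events archival
instance (branch_id : String) (events : List (String × List (List (String × String)))) (archival : List (String × List (List (String × String)))) (out : List String) : Decidable (Spec_get_phases_for_branch branch_id events archival out) := by unfold Spec_get_phases_for_branch; infer_instance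

-- ===== CLAIM (what is proved, stated in full; the proofs are below) =====
def Claim_equal_get_phases_for_branch : Prop := ∀ (branch_id : String) (events : List (String × List (List (String × String)))) (archival : List (String × List (List (String × String)))), Dom_get_phases_for_branch branch_id events archival → Spec_get_phases_for_branch branch_id events archival (get_phases_for_branch branch_id events archival)

-- ===== LEMMAS AND PROOFS =====

-- the lexicographic key B's sort orders by
def pvKey (p : String) : Lex (Int × String) := toLex (pvKey1 p, p)

-- sorted2 with keys (pvKey1, id) is sorted with the lexicographic key pvKey
theorem pv_sorted2_eq (xs : List String) :
    PySem.List.sorted2 xs pvKey1 (fun p => p) = PySem.List.sorted xs pvKey := by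
  rw [PySem.List.sorted_eq_foldl_insertBy]
  unfold PySem.List.sorted2
  simp only [if_neg (by decide : ¬ (false = true))]
  congr 1
  funext acc x
  congr 1
  funext a b
  rw [Bool.eq_iff_iff]
  simp only [Bool.or_eq_true, Bool.and_eq_true, Bool.not_eq_eq_eq_not, Bool.not_true,
    decide_eq_true_eq, decide_eq_false_iff_not, pvKey, Prod.Lex.toLex_lt_toLex]
  constructor
  · rintro (h | ⟨h1, h2⟩)
    · exact Or.inl h
    · by_cases hl : pvKey1 a < pvKey1 b
      · exact Or.inl hl
      · exact Or.inr ⟨by omega, h2⟩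
  · rintro (h | ⟨h1, h2⟩)
    · exact Or.inl h
    · exact Or.inr ⟨by omega, h2⟩

-- A's dedup-append loop over a Nodup list only ever tests membership in the initial accumulator
theorem pv_foldl_dedup (l : List String) (acc : List String) (hnd : l.Nodup) :
    l.foldl (fun acc p => if acc.contains p then acc else acc ++ [p]) acc
      = acc ++ l.filter (fun p => !acc.contains p) := by
  induction l generalizing acc with
  | nil => simp
  | cons p t ih =>
    rcases List.nodup_cons.mp hnd with ⟨hp, ht⟩
    simp only [List.foldl_cons, List.filter_cons]
    by_cases h : acc.contains p = true
    · rw [if_pos h, ih acc ht, h]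
      simp
    · rw [if_neg h, ih _ ht]
      have hb : (!acc.contains p) = true := by simp_all
      rw [hb]
      simp only [List.append_assoc, List.cons_append, List.nil_append]
      congr 2
      apply List.filter_congr
      intro q hq
      have hqp : q ≠ p := fun e => hp (e ▸ hq)
      simp [List.contains_eq_mem, hqp]

-- A's conditional Set.add loop is a fold of Set.add over the filtered, mapped list
theorem pv_foldl_add {β : Type} (l : List β) (s : PySem.Set String)
    (cond : β → Prop) [DecidablePred cond] (f : β → String) :
    l.foldl (fun s r => if cond r then PySem.Set.add s (f r) else s) s
      = ((l.filter (fun r => decide (cond r))).map f).foldl PySem.Set.add s := by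
  induction l generalizing s with
  | nil => rfl
  | cons r t ih =>
    simp only [List.foldl_cons, List.filter_cons]
    by_cases h : cond r
    · rw [if_pos h, decide_eq_true h, ih]; rfl
    · rw [if_neg h, decide_eq_false h]; exact ih s

theorem pv_key1_lt_of_mem {p : String} (h : p ∈ pvOrder) : pvKey1 p < 6 := by
  fin_cases h <;> decide

theorem pv_key1_eq_of_not_mem {p : String} (h : p ∉ pvOrder) : pvKey1 p = 6 := by
  unfold pvKey1
  rw [(PySem.List.index?_eq_none_iff pvOrder p).mpr h]
  rfl

-- the central fact: A's two-pass _sort_phases is B's single keyed sort, on any Nodup list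
theorem pv_sort_eq (S : List String) (h : S.Nodup) :
    pvSortPhases S = PySem.List.sorted S pvKey := by
  unfold pvSortPhases
  have hpart1 := PySem.List.foldl_append_if (fun p => PySem.Set.contains S p) (fun p => p) pvOrder []
  simp only [List.nil_append, List.map_id_fun', id] at hpart1
  show (PySem.List.sorted S (fun x => x)).foldl
      (fun acc p => if acc.contains p then acc else acc ++ [p])
      (pvOrder.foldl (fun acc p => if PySem.Set.contains S p then acc ++ [p] else acc) []) = _
  rw [hpart1]
  set part1 := List.filter (fun p => PySem.Set.contains S p) pvOrder with hpart1def
  have hndS : (PySem.List.sorted S (fun x : String => x)).Nodup :=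
    (PySem.List.sorted_perm S (fun x : String => x) false).symm.nodup h
  rw [pv_foldl_dedup _ _ hndS]
  -- rewrite the second filter's predicate to "not in pvOrder"
  have hmemS : ∀ p, p ∈ PySem.List.sorted S (fun x : String => x) ↔ p ∈ S := fun p =>
    PySem.List.mem_sorted S (fun x : String => x) false p
  have hfilt : (PySem.List.sorted S (fun x : String => x)).filter (fun p => !part1.contains p)
      = (PySem.List.sorted S (fun x : String => x)).filter (fun p => !decide (p ∈ pvOrder)) := by
    apply List.filter_congr
    intro p hp
    have hpS : p ∈ S := (hmemS p).mp hp
    have : part1.contains p = decide (p ∈ pvOrder) := by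
      rw [Bool.eq_iff_iff]
      simp [hpart1def, List.contains_eq_mem, List.mem_filter, hpS]
    rw [this]
  rw [hfilt]
  -- now the uniqueness of the strictly key-increasing rearrangement
  refine (PySem.List.sorted_eq_of_perm_of_pairwise_lt _ _ _ ?_ ?_).symm
  · -- permutation
    have hsplit := List.filter_append_perm (fun p => decide (p ∈ pvOrder)) (PySem.List.sorted S (fun x : String => x))
    have hpart : part1.Perm ((PySem.List.sorted S (fun x : String => x)).filter (fun p => decide (p ∈ pvOrder))) := by
      apply (List.perm_ext_iff_of_nodup _ _).mpr
      · intro p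
        simp only [hpart1def, List.mem_filter, decide_eq_true_eq]
        constructor
        · rintro ⟨hpo, hc⟩
          exact ⟨(hmemS p).mpr ((PySem.Set.contains_iff S p).mp hc), hpo⟩
        · rintro ⟨hps, hpo⟩
          exact ⟨hpo, (PySem.Set.contains_iff S p).mpr ((hmemS p).mp hps)⟩
      · exact List.Nodup.filter _ (by decide)
      · exact List.Nodup.filter _ hndS
    exact ((hpart.append_right _).trans hsplit).trans (PySem.List.sorted_perm S (fun x : String => x) false)
  · -- pairwise strictly increasing under pvKey
    apply List.pairwise_append.mpr
    refine ⟨?_, ?_, ?_⟩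
    · exact List.Pairwise.sublist List.filter_sublist
        (by decide : pvOrder.Pairwise (fun a b => pvKey a < pvKey b))
    · have hle := PySem.List.sorted_pairwise S (fun x : String => x)
      have hlt : (PySem.List.sorted S (fun x : String => x)).Pairwise (· < ·) :=
        (hle.and hndS).imp (fun hab => lt_of_le_of_ne hab.1 hab.2)
      refine List.pairwise_filter.mpr (hlt.imp ?_)
      intro a b hab ha hb
      simp only [Bool.not_eq_eq_eq_not, Bool.not_true, decide_eq_false_iff_not] at ha hb
      show pvKey a < pvKey b
      rw [pvKey, pvKey, Prod.Lex.toLex_lt_toLex, pv_key1_eq_of_not_mem ha, pv_key1_eq_of_not_mem hb]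
      exact Or.inr ⟨rfl, hab⟩
    · intro a ha b hb
      have hao : a ∈ pvOrder := by
        simp only [hpart1def, List.mem_filter] at ha; exact ha.1
      have hbo : b ∉ pvOrder := by
        simp only [List.mem_filter, Bool.not_eq_eq_eq_not, Bool.not_true, decide_eq_false_iff_not] at hb
        exact hb.2
      have h1 := pv_key1_lt_of_mem hao
      have h2 := pv_key1_eq_of_not_mem hbo
      show pvKey a < pvKey b
      rw [pvKey, pvKey, Prod.Lex.toLex_lt_toLex]
      exact Or.inl (by omega)

-- the set of phases both ports build
def pvPhaseSet (ev ar : List (List (String × String))) : PySem.Set String :=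
  let base : PySem.Set String :=
    PySem.Set.ofList (((ev ++ ar).filter (fun r => pvGetD r "phase" "" ≠ "")).map
      (fun r => pvGetD r "phase" ""))
  if ev ≠ [] ∨ ar ≠ [] then PySem.Set.add base "summary" else base

theorem pv_nodup_phaseSet (ev ar : List (List (String × String))) : (pvPhaseSet ev ar).Nodup := by
  unfold pvPhaseSet
  split
  · exact PySem.Set.nodup_add _ _ (PySem.Set.nodup_ofList _)
  · exact PySem.Set.nodup_ofList _

theorem pv_a_eq (branch_id : String) (events archival : List (String × List (List (String × String)))) :
    get_phases_for_branch branch_id events archival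
      = pvSortPhases (pvPhaseSet (pvGetD events branch_id []) (pvGetD archival branch_id [])) := by
  simp only [get_phases_for_branch, pvPhaseSet]
  have hbase : List.foldl (fun s record => if pvGetD record "phase" "" ≠ "" then PySem.Set.add s (pvGetD record "phase" "") else s)
      (List.foldl (fun s event => if pvGetD event "phase" "" ≠ "" then PySem.Set.add s (pvGetD event "phase" "") else s)
        PySem.Set.empty (pvGetD events branch_id [])) (pvGetD archival branch_id [])
      = PySem.Set.ofList (((pvGetD events branch_id [] ++ pvGetD archival branch_id []).filter
          (fun r => decide (pvGetD r "phase" "" ≠ ""))).map (fun r => pvGetD r "phase" "")) := by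
    rw [pv_foldl_add, pv_foldl_add, PySem.Set.ofList_eq_foldl,
      List.filter_append, List.map_append, List.foldl_append]
    rfl
  rw [hbase]

theorem pv_b_eq (branch_id : String) (events archival : List (String × List (List (String × String)))) :
    get_phases_for_branch_alt branch_id events archival
      = PySem.List.sorted2 (pvPhaseSet (pvGetD events branch_id []) (pvGetD archival branch_id [])) pvKey1 (fun p => p) := by
  rfl

-- ===== VERDICT (by name: the statement is the Claim_ definition above) =====
theorem get_phases_for_branch_spec : Claim_equal_get_phases_for_branch := by
  intro branch_id events archival _
  unfold Spec_get_phases_for_branch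
  rw [pv_a_eq, pv_b_eq, pv_sorted2_eq,
    pv_sort_eq _ (pv_nodup_phaseSet _ _)]
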